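-- pv_equiv track=rewrite | github.com/kugguk2022/lotteries | eurodreams/eurodreams_get_draws.py | dedupe_keep_best
-- ===== SOURCE A (Python) =====
-- from typing import Dict, List, Optional
--
-- def dedupe_keep_best(recs: List[Dict]) -> List[Dict]:
--     best: Dict[str, Dict] = {}
--     for r in recs:
--         k = r["date"]
--         prev = best.get(k)
--         if not prev:
--             best[k] = r
--             continue
--         # Prefer entries with draw_code; otherwise keep existing
--         if (not prev.get("draw_code")) and r.get("draw_code"):
--             best[k] = r
--     return sorted(best.values(), key=lambda x: x["date"])
-- ===== SOURCE B (Python) =====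
-- def dedupe_keep_best(recs):
--     # Stable-sort by date, then one grouping pass over runs of equal dates:
--     # keep the first record of a run, upgrading to the first one with a truthy draw_code.
--     out = []
--     for r in sorted(recs, key=lambda x: x["date"]):
--         if out and out[-1]["date"] == r["date"]:
--             if (not out[-1].get("draw_code")) and r.get("draw_code"):
--                 out[-1] = r
--         else:
--             out.append(r)
--     return out
-- ===== Notes on version B (the rewrite author's own statement) =====
-- stated objective: alternative
-- what changed: B replaces A's dict accumulator followed by a sort of the surviving values with a stable sort of the whole input by date followed by a single grouping pass over runs of equal dates (keep the run's first record, upgrade to its first record with a truthy draw_code). Pre_ excludes records that lack a 'date' key (A raises KeyError) or whose date is None (sorting then compares None, a TypeError in general; whether a run with a single None date returns or raises is an accident of where each version sorts).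
import Mathlib
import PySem

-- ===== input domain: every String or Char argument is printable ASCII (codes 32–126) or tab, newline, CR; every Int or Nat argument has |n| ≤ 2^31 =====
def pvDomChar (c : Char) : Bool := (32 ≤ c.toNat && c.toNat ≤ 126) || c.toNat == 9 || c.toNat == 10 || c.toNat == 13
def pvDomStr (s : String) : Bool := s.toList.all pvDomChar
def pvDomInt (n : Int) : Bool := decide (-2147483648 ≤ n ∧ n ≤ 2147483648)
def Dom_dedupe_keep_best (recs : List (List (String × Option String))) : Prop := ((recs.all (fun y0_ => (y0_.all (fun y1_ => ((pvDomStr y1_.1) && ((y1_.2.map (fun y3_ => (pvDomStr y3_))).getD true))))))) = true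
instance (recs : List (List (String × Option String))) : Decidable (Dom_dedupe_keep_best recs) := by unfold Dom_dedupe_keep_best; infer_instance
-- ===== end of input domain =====

-- B: instead of A's dict accumulator + final sort of the values, B stably sorts the input by
-- date and makes one grouping pass over runs of equal dates (same cost, no dict).


-- ===== PORT A =====
-- r["date"] as a String; under Pre_ the key is present and not None, so the fallback "" is never taken
-- (in Python those inputs raise KeyError / TypeError and are excluded by Pre_).
def recDate (r : List (String × Option String)) : String :=
  match (PySem.Dict.mk r).get? "date" with
  | some (some s) => s
  | _ => ""

-- truthiness of r.get("draw_code"): missing and None and "" are falsy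
def hasCode (r : List (String × Option String)) : Bool :=
  match (PySem.Dict.mk r).get? "draw_code" with
  | some (some s) => !(s == "")
  | _ => false

-- the loop body of A: k = r["date"]; prev = best.get(k); if not prev: best[k] = r
-- elif (not prev.get("draw_code")) and r.get("draw_code"): best[k] = r
def stepA (best : PySem.Dict String (List (String × Option String))) (r : List (String × Option String)) :
    PySem.Dict String (List (String × Option String)) :=
  let k := recDate r
  let prev := best.get? k
  -- "not prev": prev is None (key absent) or an empty dict — both are exactly prev.getD [] == []
  if prev.getD [] == [] then best.insert k r
  else if !hasCode (prev.getD []) && hasCode r then best.insert k r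
  else best

def dedupe_keep_best (recs : List (List (String × Option String))) : List (List (String × Option String)) :=
  let best := recs.foldl stepA PySem.Dict.empty
  PySem.List.sorted best.values (fun x => recDate x) false

-- ===== PORT B =====
-- the loop body of B; the accumulator is the output list reversed (out[-1] is its head)
def stepB (acc : List (List (String × Option String))) (r : List (String × Option String)) :
    List (List (String × Option String)) :=
  match acc with
  | prev :: rest =>
    if recDate prev == recDate r then
      (if !hasCode prev && hasCode r then r else prev) :: rest
    else r :: prev :: rest
  | [] => [r]

def dedupe_keep_best_alt (recs : List (List (String × Option String))) : List (List (String × Option String)) :=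
  ((PySem.List.sorted recs (fun x => recDate x) false).foldl stepB []).reverse

-- ===== PRECONDITION & SPEC =====
-- a record has a "date" key whose value is a string (not None)
def hasDate (r : List (String × Option String)) : Bool :=
  match (PySem.Dict.mk r).get? "date" with
  | some (some _) => true
  | _ => false

-- Pre_ excludes records that lack a "date" key (A raises KeyError) and records whose date is
-- None (sorting then compares None with None/str, a TypeError in general; whether a run with a
-- single None date returns or raises is an accident of where each version sorts).
def Pre_dedupe_keep_best (recs : List (List (String × Option String))) : Prop :=
  ∀ r ∈ recs, hasDate r = true

instance (recs : List (List (String × Option String))) : Decidable (Pre_dedupe_keep_best recs) := by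
  unfold Pre_dedupe_keep_best; infer_instance

def pvWitness_dedupe_keep_best : (List (List (String × Option String))) :=
  [[("date", some "2024-01-02"), ("draw_code", some "7")],
   [("date", some "2024-01-01")],
   [("date", some "2024-01-02"), ("draw_code", some "9")]]

def Spec_dedupe_keep_best (recs : List (List (String × Option String))) (out : List (List (String × Option String))) : Prop := out = dedupe_keep_best_alt recs
instance (recs : List (List (String × Option String))) (out : List (List (String × Option String))) : Decidable (Spec_dedupe_keep_best recs out) := by unfold Spec_dedupe_keep_best; infer_instance

-- ===== CLAIM (what is proved, stated in full; the proofs are below) =====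
def Claim_equal_dedupe_keep_best : Prop := ∀ (recs : List (List (String × Option String))), Dom_dedupe_keep_best recs → Pre_dedupe_keep_best recs → Spec_dedupe_keep_best recs (dedupe_keep_best recs)

-- ===== LEMMAS AND PROOFS =====

-- the representative A and B both keep for one date group: first record with a truthy
-- draw_code, else the first record of the group
def choose (g : List (List (String × Option String))) : List (String × Option String) :=
  match g.find? hasCode with
  | some c => c
  | none => g.headD []

theorem choose_singleton (r : List (String × Option String)) : choose [r] = r := by
  unfold choose; cases h : hasCode r <;> simp [List.find?, h]

theorem choose_mem {g : List (List (String × Option String))} (h : g ≠ []) : choose g ∈ g := by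
  unfold choose
  cases hf : g.find? hasCode with
  | some c => exact List.mem_of_find?_eq_some hf
  | none => cases g with
    | nil => exact absurd rfl h
    | cons a t => simp

theorem choose_append_singleton (g : List (List (String × Option String))) (hg : g ≠ [])
    (r : List (String × Option String)) :
    choose (g ++ [r]) = if !hasCode (choose g) && hasCode r then r else choose g := by
  unfold choose
  cases hf : g.find? hasCode with
  | some c =>
    have hc := List.find?_some hf
    rw [List.find?_append, hf]
    simp [hc]
  | none =>
    have hall : ∀ x ∈ g, hasCode x = false := by
      intro x hx
      have := List.find?_eq_none.mp hf x hx
      simpa using this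
    have hhead : hasCode (g.headD []) = false := by
      cases g with
      | nil => exact absurd rfl hg
      | cons a t => exact hall a (by simp)
    rw [List.find?_append, hf]
    rw [List.headD_eq_head?_getD] at hhead
    cases hr : hasCode r with
    | true => simp [List.find?, hr, hhead]
    | false =>
      simp [List.find?, hr]
      cases g with
      | nil => exact absurd rfl hg
      | cons a t => simp

theorem filter_eq_nil_of_not_mem {xs : List (List (String × Option String))} {k : String}
    (h : k ∉ xs.map recDate) : xs.filter (fun r => recDate r == k) = [] := by
  rw [List.filter_eq_nil_iff]
  intro r hr
  simp only [beq_iff_eq]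
  intro he; exact h (he ▸ List.mem_map_of_mem hr)

theorem filter_ne_nil_of_mem {xs : List (List (String × Option String))} {k : String}
    (h : k ∈ xs.map recDate) : xs.filter (fun r => recDate r == k) ≠ [] := by
  obtain ⟨r, hr, he⟩ := List.mem_map.mp h
  intro hnil
  have : r ∈ xs.filter (fun r => recDate r == k) := by
    rw [List.mem_filter]; exact ⟨hr, by simp [he]⟩
  rw [hnil] at this; exact absurd this (by simp)

theorem recDate_choose_filter {xs : List (List (String × Option String))} {k : String}
    (h : k ∈ xs.map recDate) : recDate (choose (xs.filter (fun r => recDate r == k))) = k := by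
  have hmem := choose_mem (filter_ne_nil_of_mem h)
  have := (List.mem_filter.mp hmem).2
  simpa using this

theorem hasDate_ne_nil {r : List (String × Option String)} (h : hasDate r = true) : r ≠ [] := by
  intro he; subst he; simp [hasDate, PySem.Dict.get?] at h

theorem ofList_sublist {α : Type} [BEq α] [LawfulBEq α] (l : List α) :
    (PySem.Set.ofList l).Sublist l := by
  induction l using List.reverseRecOn with
  | nil => simp [PySem.Set.ofList]
  | append_singleton t x ih =>
    rw [PySem.Set.ofList_append_singleton, PySem.Set.add_eq_ite]
    split
    · exact ih.trans (List.sublist_append_left t [x])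
    · exact ih.append (List.Sublist.refl [x])

theorem dedup_pairwise_lt (l : List String) (h : l.Pairwise (· ≤ ·)) :
    (PySem.List.dedup l).Pairwise (· < ·) := by
  rw [PySem.List.dedup_eq_ofList]
  have h1 : (PySem.Set.ofList l).Pairwise (· ≤ ·) := h.sublist (ofList_sublist l)
  have h2 : (PySem.Set.ofList l).Nodup := PySem.Set.nodup_ofList l
  exact (h1.and h2).imp (fun ⟨hle, hne⟩ => lt_of_le_of_ne hle hne)

theorem filter_append_singleton_key (p : List (List (String × Option String)))
    (r : List (String × Option String)) (k : String) :
    (p ++ [r]).filter (fun x => recDate x == k)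
      = p.filter (fun x => recDate x == k) ++ (if recDate r == k then [r] else []) := by
  rw [List.filter_append, List.filter_cons, List.filter_nil]

-- canonical form: one entry per distinct date (first-occurrence order), each the chosen record
def canon (xs : List (List (String × Option String))) : List (List (String × Option String)) :=
  (PySem.List.dedup (xs.map recDate)).map (fun k => choose (xs.filter (fun r => recDate r == k)))

-- A's dict after the fold, entry by entry
theorem buildA_items (xs : List (List (String × Option String))) (hpre : ∀ r ∈ xs, hasDate r = true) :
    (xs.foldl stepA PySem.Dict.empty).items
      = (PySem.List.dedup (xs.map recDate)).map
          (fun k => (k, choose (xs.filter (fun r => recDate r == k)))) := by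
  induction xs using List.reverseRecOn with
  | nil => simp [PySem.Dict.empty, PySem.List.dedup_eq_ofList, PySem.Set.ofList]
  | append_singleton xs r ih =>
    have hpre' : ∀ a ∈ xs, hasDate a = true := fun a ha => hpre a (by simp [ha])
    have hitems := ih hpre'
    have hkeys : (xs.foldl stepA PySem.Dict.empty).keys = PySem.List.dedup (xs.map recDate) := by
      simp only [PySem.Dict.keys, hitems, List.map_map]
      simp [Function.comp_def]
    have hnodup : (xs.foldl stepA PySem.Dict.empty).keys.Nodup := by
      rw [hkeys]; exact PySem.List.nodup_dedup _
    rw [List.foldl_append, List.foldl_cons, List.foldl_nil]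
    simp only [stepA]
    by_cases hmem : recDate r ∈ PySem.List.dedup (xs.map recDate)
    · -- the date is already a key: the match takes the `some prev` branch
      have hmemmap : recDate r ∈ xs.map recDate := by
        rw [PySem.List.dedup_eq_ofList] at hmem
        exact (PySem.Set.mem_ofList _ _).mp hmem
      have hget : (xs.foldl stepA PySem.Dict.empty).get? (recDate r)
          = some (choose (xs.filter (fun a => recDate a == recDate r))) := by
        refine PySem.Dict.get?_of_mem_items _ ?_ hnodup
        rw [hitems]
        exact List.mem_map_of_mem hmem
      rw [hget]
      simp only [Option.getD_some]
      have hprevmem : choose (xs.filter (fun a => recDate a == recDate r)) ∈ xs := by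
        have := choose_mem (filter_ne_nil_of_mem hmemmap)
        exact (List.mem_filter.mp this).1
      have hprevne : (choose (xs.filter (fun a => recDate a == recDate r)) == ([] : List (String × Option String))) = false := by
        have := hasDate_ne_nil (hpre' _ hprevmem)
        simp [this]
      rw [hprevne]
      simp only [Bool.false_eq_true, if_false]
      have hKnew : PySem.List.dedup ((xs ++ [r]).map recDate)
          = PySem.List.dedup (xs.map recDate) := by
        rw [List.map_append, List.map_cons, List.map_nil,
          PySem.List.dedup_eq_ofList, PySem.List.dedup_eq_ofList,
          PySem.Set.ofList_append_singleton]
        exact PySem.Set.add_of_mem ((PySem.Set.mem_ofList _ _).mpr hmemmap)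
      rw [hKnew]
      have hcontains : (xs.foldl stepA PySem.Dict.empty).contains (recDate r) = true := by
        rw [PySem.Dict.contains_eq_isSome_get?, hget]; rfl
      by_cases hcond : (!hasCode (choose (xs.filter (fun a => recDate a == recDate r)))
          && hasCode r) = true
      · rw [if_pos hcond, PySem.Dict.items_insert_of_contains _ _ hcontains, hitems,
          List.map_map]
        apply List.map_congr_left
        intro k' hk'
        simp only [Function.comp]
        by_cases hkk : k' = recDate r
        · subst hkk
          rw [if_pos (by simp)]
          rw [filter_append_singleton_key, if_pos (by simp),
            choose_append_singleton _ (filter_ne_nil_of_mem hmemmap) r, if_pos hcond]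
        · rw [if_neg (by simp [hkk])]
          rw [filter_append_singleton_key, if_neg (by simp; exact fun h => hkk h.symm),
            List.append_nil]
      · rw [if_neg hcond, hitems]
        apply List.map_congr_left
        intro k' hk'
        by_cases hkk : k' = recDate r
        · subst hkk
          rw [filter_append_singleton_key, if_pos (by simp),
            choose_append_singleton _ (filter_ne_nil_of_mem hmemmap) r, if_neg hcond]
        · rw [filter_append_singleton_key, if_neg (by simp; exact fun h => hkk h.symm),
            List.append_nil]
    · -- a new date: the match takes the `none` branch
      have hnotmap : recDate r ∉ xs.map recDate := fun h =>
        hmem (by rw [PySem.List.dedup_eq_ofList]; exact (PySem.Set.mem_ofList _ _).mpr h)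
      have hget : (xs.foldl stepA PySem.Dict.empty).get? (recDate r) = none := by
        rw [PySem.Dict.get?_eq_none_iff_not_mem_keys, hkeys]
        exact hmem
      rw [hget]
      simp only [Option.getD_none, BEq.rfl, if_true]
      have hcontains : (xs.foldl stepA PySem.Dict.empty).contains (recDate r) = false := by
        rw [PySem.Dict.contains_eq_isSome_get?, hget]; rfl
      rw [PySem.Dict.items_insert_of_not_contains _ _ hcontains, hitems]
      have hKnew : PySem.List.dedup ((xs ++ [r]).map recDate)
          = PySem.List.dedup (xs.map recDate) ++ [recDate r] := by
        rw [List.map_append, List.map_cons, List.map_nil,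
          PySem.List.dedup_eq_ofList, PySem.List.dedup_eq_ofList,
          PySem.Set.ofList_append_singleton]
        exact PySem.Set.add_of_not_mem (fun h => hnotmap ((PySem.Set.mem_ofList _ _).mp h))
      rw [hKnew, List.map_append, List.map_cons, List.map_nil]
      congr 1
      · apply List.map_congr_left
        intro k' hk'
        have hk'mem : k' ∈ xs.map recDate := by
          rw [PySem.List.dedup_eq_ofList] at hk'
          exact (PySem.Set.mem_ofList _ _).mp hk'
        have hne : recDate r ≠ k' := fun h => hnotmap (h ▸ hk'mem)
        rw [filter_append_singleton_key, if_neg (by simp [hne]), List.append_nil]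
      · rw [filter_append_singleton_key, if_pos (by simp),
          filter_eq_nil_of_not_mem hnotmap, List.nil_append, choose_singleton]

-- B's grouping scan over a key-sorted list
theorem scanB (ss : List (List (String × Option String)))
    (hs : ss.Pairwise (fun a b => recDate a ≤ recDate b)) :
    (ss.foldl stepB []).reverse = canon ss := by
  induction ss using List.reverseRecOn with
  | nil => simp [canon, PySem.List.dedup_eq_ofList, PySem.Set.ofList]
  | append_singleton p r ih =>
    have hp : p.Pairwise (fun a b => recDate a ≤ recDate b) :=
      hs.sublist (List.sublist_append_left p [r])
    have hr_ge : ∀ a ∈ p, recDate a ≤ recDate r := by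
      have := (List.pairwise_append.mp hs).2.2
      intro a ha; exact this a ha r (by simp)
    have ihp := ih hp
    rw [List.foldl_append, List.foldl_cons, List.foldl_nil]
    cases p with
    | nil =>
      simp only [List.foldl_nil, stepB, List.reverse_cons, List.reverse_nil, List.nil_append]
      simp [canon, PySem.List.dedup_eq_ofList, PySem.Set.ofList, PySem.Set.add,
        choose_singleton]
    | cons q p' =>
      -- p is nonempty; name its canonical key list K = K' ++ [kl]
      generalize hP : (q :: p' : List (List (String × Option String))) = p at *
      have hpne : p ≠ [] := by rw [← hP]; simp
      have hKmap : p.map recDate ≠ [] := by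
        intro h; exact hpne (List.map_eq_nil_iff.mp h)
      have hKne : PySem.List.dedup (p.map recDate) ≠ [] := by
        intro h
        have : p.map recDate = [] := by
          cases hm : p.map recDate with
          | nil => rfl
          | cons a t =>
            rw [hm, PySem.List.dedup_eq_ofList, PySem.Set.ofList_cons] at h
            exact absurd h (by simp)
        exact hKmap this
      obtain ⟨K', kl, hK⟩ := (List.eq_nil_or_concat (PySem.List.dedup (p.map recDate))).resolve_left hKne
      rw [List.concat_eq_append] at hK
      have hpmap_pw : (p.map recDate).Pairwise (· ≤ ·) := List.pairwise_map.mpr hp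
      have hKlt : (PySem.List.dedup (p.map recDate)).Pairwise (· < ·) :=
        dedup_pairwise_lt _ hpmap_pw
      have hK'lt : ∀ k' ∈ K', k' < kl := by
        rw [hK] at hKlt
        have := (List.pairwise_append.mp hKlt).2.2
        intro k' hk'; exact this k' hk' kl (by simp)
      have hklmem : kl ∈ p.map recDate := by
        have : kl ∈ PySem.List.dedup (p.map recDate) := by rw [hK]; simp
        rw [PySem.List.dedup_eq_ofList] at this
        exact (PySem.Set.mem_ofList _ _).mp this
      have hklle : kl ≤ recDate r := by
        obtain ⟨a, ha, he⟩ := List.mem_map.mp hklmem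
        exact he ▸ hr_ge a ha
      have hprevkey : recDate (choose (p.filter (fun x => recDate x == kl))) = kl :=
        recDate_choose_filter hklmem
      -- the accumulator after p, as a cons
      have hacc : p.foldl stepB []
          = choose (p.filter (fun x => recDate x == kl))
            :: (K'.map (fun k => choose (p.filter (fun x => recDate x == k)))).reverse := by
        have := congrArg List.reverse ihp
        rw [List.reverse_reverse] at this
        rw [this, canon, hK, List.map_append, List.map_cons, List.map_nil,
          List.reverse_append]
        simp
      rw [hacc]
      by_cases hcase : recDate r = kl
      · -- r joins the last group
        have hbeq : (recDate (choose (p.filter (fun x => recDate x == kl))) == recDate r) = true := by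
          simp [hprevkey, hcase]
        simp only [stepB, hbeq, if_true]
        have hKnew : PySem.List.dedup ((p ++ [r]).map recDate)
            = PySem.List.dedup (p.map recDate) := by
          rw [List.map_append, List.map_cons, List.map_nil,
            PySem.List.dedup_eq_ofList, PySem.List.dedup_eq_ofList,
            PySem.Set.ofList_append_singleton]
          exact PySem.Set.add_of_mem ((PySem.Set.mem_ofList _ _).mpr (hcase ▸ hklmem))
        rw [canon, hKnew, hK, List.map_append, List.map_cons, List.map_nil]
        have hK'same : K'.map (fun k => choose ((p ++ [r]).filter (fun x => recDate x == k)))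
            = K'.map (fun k => choose (p.filter (fun x => recDate x == k))) := by
          apply List.map_congr_left
          intro k' hk'
          rw [filter_append_singleton_key, if_neg (by simp [hcase]; exact (hK'lt k' hk').ne'), List.append_nil]
        have hlast : choose ((p ++ [r]).filter (fun x => recDate x == kl))
            = if !hasCode (choose (p.filter (fun x => recDate x == kl))) && hasCode r then r
              else choose (p.filter (fun x => recDate x == kl)) := by
          rw [filter_append_singleton_key, if_pos (by simp [hcase])]
          exact choose_append_singleton _ (filter_ne_nil_of_mem hklmem) r
        rw [hK'same, hlast]
        simp
      · -- r opens a new group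
        have hnotmem : recDate r ∉ p.map recDate := by
          intro hmem
          have : recDate r ∈ PySem.List.dedup (p.map recDate) := by
            rw [PySem.List.dedup_eq_ofList]; exact (PySem.Set.mem_ofList _ _).mpr hmem
          rw [hK] at this
          rcases List.mem_append.mp this with h | h
          · exact absurd (lt_of_le_of_lt hklle (hK'lt _ h)) (lt_irrefl _)
          · exact hcase (by simpa using h)
        have hbeq : (recDate (choose (p.filter (fun x => recDate x == kl))) == recDate r) = false := by
          simp [hprevkey]; exact fun h => hcase h.symm
        simp only [stepB, hbeq, Bool.false_eq_true, if_false]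
        have hKnew : PySem.List.dedup ((p ++ [r]).map recDate)
            = PySem.List.dedup (p.map recDate) ++ [recDate r] := by
          rw [List.map_append, List.map_cons, List.map_nil,
            PySem.List.dedup_eq_ofList, PySem.List.dedup_eq_ofList,
            PySem.Set.ofList_append_singleton]
          exact PySem.Set.add_of_not_mem (fun h => hnotmem ((PySem.Set.mem_ofList _ _).mp h))
        rw [canon, hKnew, List.map_append, List.map_cons, List.map_nil]
        have hsame : (PySem.List.dedup (p.map recDate)).map
              (fun k => choose ((p ++ [r]).filter (fun x => recDate x == k)))
            = (PySem.List.dedup (p.map recDate)).map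
              (fun k => choose (p.filter (fun x => recDate x == k))) := by
          apply List.map_congr_left
          intro k' hk'
          have hk'mem : k' ∈ p.map recDate := by
            rw [PySem.List.dedup_eq_ofList] at hk'
            exact (PySem.Set.mem_ofList _ _).mp hk'
          have hne : recDate r ≠ k' := fun h => hnotmem (h ▸ hk'mem)
          rw [filter_append_singleton_key, if_neg (by simp [hne]), List.append_nil]
        have hnew : choose ((p ++ [r]).filter (fun x => recDate x == recDate r)) = r := by
          rw [filter_append_singleton_key, if_pos (by simp),
            filter_eq_nil_of_not_mem hnotmem, List.nil_append]
          exact choose_singleton r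
        rw [hsame, hnew, ← canon]
        rw [show canon p = (List.foldl stepB [] p).reverse from ihp.symm, hacc]
        simp

-- stability of the sort: each date group keeps its original order
theorem filter_insertBy {α : Type} (key : α → String) (x : α) (ys : List α)
    (hys : ys.Pairwise (fun a b => key a ≤ key b)) (k : String) :
    (PySem.List.insertBy (fun a b => decide (key a < key b)) x ys).filter (fun r => key r == k)
      = if key x == k then ys.filter (fun r => key r == k) ++ [x]
        else ys.filter (fun r => key r == k) := by
  induction ys with
  | nil => simp only [PySem.List.insertBy, List.filter_nil]; split <;> simp_all
  | cons y ys ih =>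
    simp only [PySem.List.insertBy]
    by_cases hb : key x < key y
    · rw [if_pos (by simp [hb])]
      have hnil : (key x == k) = true → (y :: ys).filter (fun r => key r == k) = [] := by
        intro hk
        rw [List.filter_eq_nil_iff]
        intro z hz
        have hyz : key y ≤ key z := by
          rcases List.mem_cons.mp hz with h | h
          · exact h ▸ le_refl _
          · exact (List.pairwise_cons.mp hys).1 z h
        have hxz : key x < key z := lt_of_lt_of_le hb hyz
        simp only [beq_iff_eq] at hk ⊢
        intro he
        rw [he, ← hk] at hxz
        exact lt_irrefl _ hxz
      rw [List.filter_cons]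
      by_cases hk : (key x == k) = true
      · rw [if_pos hk, if_pos hk, hnil hk]; simp
      · rw [if_neg hk, if_neg hk]
    · rw [if_neg (by simp [hb])]
      rw [List.filter_cons, List.filter_cons, ih (List.pairwise_cons.mp hys).2]
      split <;> split <;> simp

theorem filter_sorted (xs : List (List (String × Option String))) (k : String) :
    (PySem.List.sorted xs (fun x => recDate x) false).filter (fun r => recDate r == k)
      = xs.filter (fun r => recDate r == k) := by
  induction xs using List.reverseRecOn with
  | nil => simp [PySem.List.sorted]
  | append_singleton t x ih =>
    rw [PySem.List.sorted_eq_foldl_insertBy, List.foldl_append, ← PySem.List.sorted_eq_foldl_insertBy]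
    simp only [List.foldl_cons, List.foldl_nil]
    rw [filter_insertBy (fun x => recDate x) x _ (PySem.List.sorted_pairwise t _) k]
    rw [ih, List.filter_append, List.filter_cons, List.filter_nil]
    split <;> simp

-- ===== VERDICT (by name: the statement is the Claim_ definition above) =====
theorem dedupe_keep_best_spec : Claim_equal_dedupe_keep_best := by
  intro recs _ hpre
  unfold Spec_dedupe_keep_best dedupe_keep_best dedupe_keep_best_alt
  -- A's dict values are exactly the canonical representatives, in first-occurrence key order
  have hvals : (recs.foldl stepA PySem.Dict.empty).values = canon recs := by
    simp only [PySem.Dict.values, buildA_items recs hpre, List.map_map]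
    simp [Function.comp_def, canon]
  -- rewrite B's groups through sort stability
  have hcan_ss : canon (PySem.List.sorted recs (fun x => recDate x) false)
      = (PySem.List.dedup ((PySem.List.sorted recs (fun x => recDate x) false).map recDate)).map
          (fun k => choose (recs.filter (fun r => recDate r == k))) := by
    unfold canon
    exact List.map_congr_left (fun k _ => by rw [filter_sorted])
  have hndKs : (PySem.List.dedup ((PySem.List.sorted recs (fun x => recDate x) false).map recDate)).Nodup :=
    PySem.List.nodup_dedup _
  have hndKr : (PySem.List.dedup (recs.map recDate)).Nodup := PySem.List.nodup_dedup _
  have hperm : (PySem.List.dedup ((PySem.List.sorted recs (fun x => recDate x) false).map recDate)).Perm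
      (PySem.List.dedup (recs.map recDate)) := by
    rw [List.perm_ext_iff_of_nodup hndKs hndKr]
    intro k
    simp only [PySem.List.dedup_eq_ofList, PySem.Set.mem_ofList, List.mem_map,
      PySem.List.mem_sorted]
  have hpwK : (PySem.List.dedup ((PySem.List.sorted recs (fun x => recDate x) false).map recDate)).Pairwise (· < ·) :=
    dedup_pairwise_lt _ (PySem.List.sorted_map_key_pairwise recs _)
  have hkey : ∀ k ∈ PySem.List.dedup ((PySem.List.sorted recs (fun x => recDate x) false).map recDate),
      recDate (choose (recs.filter (fun r => recDate r == k))) = k := by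
    intro k hk
    apply recDate_choose_filter
    rw [PySem.List.dedup_eq_ofList, PySem.Set.mem_ofList] at hk
    obtain ⟨a, ha, he⟩ := List.mem_map.mp hk
    exact List.mem_map.mpr ⟨a, (PySem.List.mem_sorted _ _ _ _).mp ha, he⟩
  have hpwF : ((PySem.List.dedup ((PySem.List.sorted recs (fun x => recDate x) false).map recDate)).map
        (fun k => choose (recs.filter (fun r => recDate r == k)))).Pairwise
      (fun a b => recDate a < recDate b) := by
    rw [List.pairwise_map]
    refine hpwK.imp_of_mem ?_
    intro a b ha hb hlt
    rw [hkey a ha, hkey b hb]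
    exact hlt
  show PySem.List.sorted (List.foldl stepA PySem.Dict.empty recs).values (fun x => recDate x) false
      = (List.foldl stepB [] (PySem.List.sorted recs (fun x => recDate x) false)).reverse
  rw [hvals, scanB _ (PySem.List.sorted_pairwise recs _), hcan_ss, canon]
  exact PySem.List.sorted_eq_of_perm_of_pairwise_lt _ _ _ (hperm.map _) hpwF
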